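-- pv_equiv track=rewrite | github.com/DurjoyKumar177/my-journey-of-code | Python/Practice Day/web_good_seq.py | min_removals_to_good_sequence
-- ===== SOURCE A (Python) =====
-- def min_removals_to_good_sequence(n, a):
--     frequency = {}
--
--     # Count frequencies of each element
--     for num in a:
--         if num in frequency:
--             frequency[num] += 1
--         else:
--             frequency[num] = 1
--
--     removals = 0
--
--     # Calculate the number of removals required
--     for x, count in frequency.items():
--         if count > x:
--             removals += count - x
--         else:
--             removals += count
--
--     return removals
-- ===== SOURCE B (Python) =====
-- def min_removals_to_good_sequence(n, a):
--     # sort a copy, then scan runs of equal values with two indices: a run of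
--     # length c of value x contributes c - x removals if c > x, else all c
--     b = sorted(a)
--     removed = 0
--     i = 0
--     while i < len(b):
--         x = b[i]
--         j = i + 1
--         while j < len(b) and b[j] == x:
--             j += 1
--         c = j - i
--         removed += c - x if c > x else c
--         i = j
--     return removed
-- ===== Notes on version B (the rewrite author's own statement) =====
-- stated objective: alternative
-- what changed: Replaces A's hash-based frequency dict and second pass over its items by sorting a copy and scanning it once, aggregating each run of equal values with the same count>x formula; trades O(n) hashing for O(n log n) sorting with no dict at all.
import Mathlib
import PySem

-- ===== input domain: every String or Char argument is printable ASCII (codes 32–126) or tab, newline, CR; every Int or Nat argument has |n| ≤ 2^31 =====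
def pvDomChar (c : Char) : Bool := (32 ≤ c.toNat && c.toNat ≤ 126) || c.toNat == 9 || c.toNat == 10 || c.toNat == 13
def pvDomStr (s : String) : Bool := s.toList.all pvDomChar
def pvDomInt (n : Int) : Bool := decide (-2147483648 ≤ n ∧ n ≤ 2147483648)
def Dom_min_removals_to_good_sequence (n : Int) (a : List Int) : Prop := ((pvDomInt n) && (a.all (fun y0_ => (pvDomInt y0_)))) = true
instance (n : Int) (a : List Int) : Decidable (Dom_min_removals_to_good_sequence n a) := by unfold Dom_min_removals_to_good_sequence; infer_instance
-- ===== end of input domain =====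

-- B replaces A's hash-frequency dict by sort-then-scan over runs of equal values (same result, different algorithm).

-- ===== PORT A =====
def min_removals_to_good_sequence (n : Int) (a : List Int) : Int :=
  let frequency : PySem.Dict Int Int :=
    a.foldl (fun d num =>
      if d.contains num then d.insert num (d.getD num 0 + 1) else d.insert num 1)
      PySem.Dict.empty
  frequency.items.foldl (fun removals xc =>
    if xc.2 > xc.1 then removals + (xc.2 - xc.1) else removals + xc.2) 0

-- ===== PORT B =====
-- inner while: advance j over the run of x in b
def pvScan (b : List Int) (x : Int) (j : Nat) : Nat :=
  if j < b.length ∧ b.getD j 0 == x then pvScan b x (j + 1) else j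
  termination_by b.length - j
  decreasing_by omega

-- termination helper for the outer while (cited by pvOuter's decreasing_by)
theorem pvScan_ge (b : List Int) (x : Int) (j : Nat) : j ≤ pvScan b x j := by
  induction j using pvScan.induct (b := b) (x := x) with
  | case1 j h ih => rw [pvScan, if_pos h]; omega
  | case2 j h => rw [pvScan, if_neg h]

-- outer while over the sorted copy: one run per step
def pvOuter (b : List Int) (i : Nat) : Int :=
  if i < b.length then
    let x := b.getD i 0
    let j := pvScan b x (i + 1)
    let c : Int := (j : Int) - (i : Int)
    (if c > x then c - x else c) + pvOuter b j
  else 0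
  termination_by b.length - i
  decreasing_by have := pvScan_ge b (b.getD i 0) (i + 1); omega

def min_removals_to_good_sequence_alt (n : Int) (a : List Int) : Int :=
  pvOuter (PySem.List.sorted a (fun x => x) false) 0

-- ===== PRECONDITION & SPEC =====
def Spec_min_removals_to_good_sequence (n : Int) (a : List Int) (out : Int) : Prop := out = min_removals_to_good_sequence_alt n a
instance (n : Int) (a : List Int) (out : Int) : Decidable (Spec_min_removals_to_good_sequence n a out) := by unfold Spec_min_removals_to_good_sequence; infer_instance

-- ===== CLAIM (what is proved, stated in full; the proofs are below) =====
def Claim_equal_min_removals_to_good_sequence : Prop := ∀ (n : Int) (a : List Int), Dom_min_removals_to_good_sequence n a → Spec_min_removals_to_good_sequence n a (min_removals_to_good_sequence n a)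

-- ===== LEMMAS AND PROOFS =====

-- leading-run length (abstract view of the inner while, on the suffix)
def pvRunLen (x : Int) : List Int → Nat
  | [] => 0
  | y :: t => if y == x then pvRunLen x t + 1 else 0

-- run-consuming recursion (abstract view of the outer while)
def pvGo : List Int → Int
  | [] => 0
  | x :: t =>
      let c : Nat := 1 + pvRunLen x t
      (if (c : Int) > x then (c : Int) - x else (c : Int)) + pvGo (List.drop c (x :: t))
  termination_by b => b.length
  decreasing_by simp

-- the contribution of one value k occurring c times
def pvF (k : Int) (c : Nat) : Int := if (c : Int) > k then (c : Int) - k else (c : Int)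

-- A's counting loop builds exactly Counter(a)
theorem pv_freq_eq_counter (a : List Int) :
    a.foldl (fun d num =>
      if d.contains num then d.insert num (d.getD num 0 + 1) else d.insert num 1)
      PySem.Dict.empty = PySem.Dict.counter a := by
  rw [← PySem.Dict.foldl_insert_getD_add_one_eq_counter]
  apply PySem.List.foldl_congr_mem
  intro d num _
  by_cases h : d.contains num = true
  · simp [h]
  · simp only [Bool.not_eq_true] at h
    simp [h, PySem.Dict.getD_of_not_contains d 0 h]

-- A's accumulation loop over the items as a sum (branch folded into the added term)
theorem pv_fold_items (L : List (Int × Int)) (acc : Int) :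
    L.foldl (fun removals xc =>
      if xc.2 > xc.1 then removals + (xc.2 - xc.1) else removals + xc.2) acc
      = acc + (L.map (fun xc => if xc.2 > xc.1 then xc.2 - xc.1 else xc.2)).sum := by
  induction L generalizing acc with
  | nil => simp
  | cons h t ih =>
    by_cases hc : h.2 > h.1 <;> simp [hc, ih] <;> ring

theorem pvRunLen_le (x : Int) (t : List Int) : pvRunLen x t ≤ t.length := by
  induction t with
  | nil => simp [pvRunLen]
  | cons y t ih =>
    by_cases h : y == x
    · simp [pvRunLen, h]; omega
    · simp [pvRunLen, h]


theorem pv_take_run (x : Int) (t : List Int) :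
    ∀ y ∈ t.take (pvRunLen x t), y = x := by
  induction t with
  | nil => simp [pvRunLen]
  | cons y t ih =>
    by_cases h : y = x
    · simp [pvRunLen, h]; exact fun b hb => ih b hb
    · simp [pvRunLen, h]

-- in a sorted tail whose elements all dominate x, the count of x is its leading run
theorem pvRunLen_count (x : Int) (t : List Int)
    (h1 : ∀ y ∈ t, x ≤ y) (h2 : t.Pairwise (· ≤ ·)) :
    t.count x = pvRunLen x t := by
  induction t with
  | nil => simp [pvRunLen]
  | cons y t ih =>
    rcases List.pairwise_cons.mp h2 with ⟨hy, ht⟩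
    by_cases h : y = x
    · subst h
      simp only [pvRunLen, BEq.rfl, if_pos, List.count_cons_self]
      rw [ih (fun z hz => le_trans (h1 y (by simp)) (hy z hz)) ht]
    · have hx : x < y := lt_of_le_of_ne (h1 y (by simp)) (Ne.symm h)
      have : t.count x = 0 := List.count_eq_zero.mpr (fun hm => by
        have := hy x hm; omega)
      simp [pvRunLen, h, this]

-- the run-consuming recursion computes the per-distinct-value sum
theorem pv_go_eq (s : List Int) (hs : s.Pairwise (· ≤ ·)) :
    pvGo s = s.toFinset.sum (fun k => pvF k (s.count k)) := by
  induction hn : s.length using Nat.strong_induction_on generalizing s with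
  | _ N ih =>
  match s, hs with
  | [], _ => rw [pvGo]; simp
  | x :: t, hs =>
    rcases List.pairwise_cons.mp hs with ⟨hx, ht⟩
    set r := pvRunLen x t with hr
    set d := t.drop r with hd
    have htd : t = t.take r ++ d := (List.take_append_drop r t).symm
    have hcx : t.count x = r := pvRunLen_count x t hx ht
    have htake : ∀ y ∈ t.take r, y = x := pv_take_run x t
    have hctake : (t.take r).count x = (t.take r).length := by
      rw [List.count_eq_length]; exact fun b hb => (htake b hb).symm
    have hle : r ≤ t.length := pvRunLen_le x t
    have hlentake : (t.take r).length = r := by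
      simp [List.length_take]; omega
    have hcdx : d.count x = 0 := by
      have := congrArg (fun l => List.count x l) htd
      simp only [List.count_append] at this
      omega
    have hxd : x ∉ d := by
      intro hm; have := List.count_pos_iff.mpr hm; omega
    have hck : ∀ k : Int, k ≠ x → t.count k = d.count k := by
      intro k hk
      have hz : (t.take r).count k = 0 := List.count_eq_zero.mpr
        (fun hm => hk (htake k hm))
      have := congrArg (fun l => List.count k l) htd
      simp only [List.count_append] at this
      omega
    have hdsub : d.Sublist t := List.drop_sublist r t
    have hdp : d.Pairwise (· ≤ ·) := List.Pairwise.sublist hdsub ht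
    have hfin : (x :: t).toFinset = insert x d.toFinset := by
      apply Finset.ext; intro k
      simp only [List.mem_toFinset, Finset.mem_insert, List.mem_cons]
      constructor
      · rintro (h | h)
        · exact Or.inl h
        · by_cases hk : k = x
          · exact Or.inl hk
          · right
            rw [htd] at h
            rcases List.mem_append.mp h with h' | h'
            · exact absurd (htake k h') hk
            · simpa using h'
      · rintro (h | h)
        · exact Or.inl h
        · exact Or.inr (hdsub.mem h)
    have hdrop : List.drop (1 + r) (x :: t) = d := by
      rw [Nat.add_comm, List.drop_succ_cons]
    have hlend : d.length < N := by
      subst hn; simp only [hd, List.length_drop, List.length_cons]; omega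
    have hrec : pvGo d = d.toFinset.sum (fun k => pvF k (d.count k)) :=
      ih d.length hlend d hdp rfl
    have hxdf : x ∉ d.toFinset := by simpa using hxd
    rw [pvGo]
    simp only [← hr, hdrop, hrec, hfin, Finset.sum_insert hxdf]
    have h1 : (x :: t).count x = 1 + r := by
      rw [List.count_cons_self, hcx]; omega
    have h2 : ∀ k ∈ d.toFinset, pvF k ((x :: t).count k) = pvF k (d.count k) := by
      intro k hk
      have hkx : k ≠ x := fun h => hxd (h ▸ List.mem_toFinset.mp hk)
      rw [show List.count k (x :: t) = List.count k t by
        simp [Ne.symm hkx], hck k hkx]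
    rw [Finset.sum_congr rfl h2, h1]
    rfl

-- the index scans compute the suffix-based recursion
theorem pvScan_eq (b : List Int) (x : Int) (j : Nat) :
    pvScan b x j = j + pvRunLen x (b.drop j) := by
  induction j using pvScan.induct (b := b) (x := x) with
  | case1 j h ih =>
    rcases h with ⟨hj, hx⟩
    rw [pvScan, if_pos ⟨hj, hx⟩, ih, List.drop_eq_getElem_cons hj]
    have hbx : b[j] = x := by
      have hg : b.getD j 0 = b[j] := List.getD_eq_getElem b 0 hj
      rw [hg] at hx; exact eq_of_beq hx
    simp [pvRunLen, hbx]
    omega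
  | case2 j h =>
    rw [pvScan, if_neg h]
    by_cases hj : j < b.length
    · have hx : ¬ (b.getD j 0 == x) = true := fun hx => h ⟨hj, hx⟩
      rw [List.drop_eq_getElem_cons hj]
      have hne : ¬ (b[j] == x) = true := by
        rwa [← List.getD_eq_getElem b 0 hj]
      simp [pvRunLen, hne]
    · rw [List.drop_eq_nil_of_le (by omega)]; simp [pvRunLen]

theorem pvOuter_eq (b : List Int) (i : Nat) :
    pvOuter b i = pvGo (b.drop i) := by
  induction i using pvOuter.induct (b := b) with
  | case1 i h x j ih =>
    rw [pvOuter, if_pos h]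
    rw [List.drop_eq_getElem_cons h, pvGo]
    have hx : b.getD i 0 = b[i] := List.getD_eq_getElem b 0 h
    have hj : pvScan b b[i] (i + 1) = i + 1 + pvRunLen b[i] (b.drop (i + 1)) := by
      rw [← hx, pvScan_eq, hx]
    set r := pvRunLen b[i] (b.drop (i + 1)) with hr
    have hdd : List.drop (1 + r) (b[i] :: b.drop (i + 1)) = b.drop (i + 1 + r) := by
      rw [Nat.add_comm 1 r, List.drop_succ_cons, List.drop_drop]
    have ih' : pvOuter b (i + 1 + r) = pvGo (List.drop (i + 1 + r) b) := by
      have h2 := ih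
      simp only [j, x, hx, hj] at h2
      exact h2
    simp only [hx, hj]
    have hcast : ((i + 1 + r : Nat) : Int) - (i : Int) = ((1 + r : Nat) : Int) := by
      push_cast; ring
    rw [hcast, hdd, ih']
  | case2 i h =>
    rw [pvOuter, if_neg h, List.drop_eq_nil_of_le (by omega), pvGo]

-- ===== VERDICT (by name: the statement is the Claim_ definition above) =====
theorem min_removals_to_good_sequence_spec : Claim_equal_min_removals_to_good_sequence := by
  intro n a _
  unfold Spec_min_removals_to_good_sequence min_removals_to_good_sequence min_removals_to_good_sequence_alt
  simp only [pv_freq_eq_counter, PySem.Dict.items_counter]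
  rw [pv_fold_items]
  -- A's side: the per-distinct-value sum over set(a)
  have hA : (((PySem.Set.ofList a).map (fun k => (k, ((List.count k a : Int))))).map
      (fun xc => if xc.2 > xc.1 then xc.2 - xc.1 else xc.2)).sum
      = a.toFinset.sum (fun k => pvF k (List.count k a)) := by
    rw [List.map_map]
    rw [← List.sum_toFinset _ (PySem.Set.nodup_ofList a)]
    have hfs : (PySem.Set.ofList a).toFinset = a.toFinset := by
      apply Finset.ext; intro k
      simp [List.mem_toFinset, PySem.Set.mem_ofList]
    rw [hfs]
    rfl
  rw [hA]
  -- B's side: the run scan over the sorted copy computes the same sum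
  have hperm := PySem.List.sorted_perm a (fun x => x) false
  rw [pvOuter_eq, List.drop_zero]
  rw [pv_go_eq _ (PySem.List.sorted_pairwise a (fun x => x))]
  rw [List.toFinset_eq_of_perm _ _ hperm]
  have : ∀ k ∈ a.toFinset, pvF k ((PySem.List.sorted a (fun x => x) false).count k)
      = pvF k (List.count k a) := by
    intro k _; rw [hperm.count_eq]
  rw [Finset.sum_congr rfl this]
  ring
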